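-- pv_equiv track=rewrite | github.com/darmiel/flipper-scripts | subghz/generate_sleep.py | generate_sleep
-- ===== SOURCE A (Python) =====
-- from typing import List
--
-- TEMPLATE = [
--     "Filetype: Flipper SubGhz RAW File",
--     "Version: 1",
--     "Frequency: 433920000",
--     "Preset: FuriHalSubGhzPresetOok650Async",
--     "Protocol: RAW",
-- ]
--
-- MAX_TIMINGS_VALUE = 2_000_000_000
--
-- CHUNK_SIZE = 512
--
-- def generate_sleep(duration: int) -> List[str]:
--     # what duration we've already added
--     current_duration = 0
--     values = []
--
--     output = TEMPLATE[:]
--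
--     while current_duration < duration:
--         current_duration += 1000
--         values.append(1000)
--
--         # remaining time we need to add
--         remaining = min(MAX_TIMINGS_VALUE, duration - current_duration)
--         current_duration += remaining
--         values.append(-remaining)
--
--     for i in range(0, len(values), CHUNK_SIZE):
--         vals = values[i:i + CHUNK_SIZE]
--         output.append(f'RAW_Data: {" ".join([str(z) for z in vals])}')
--
--     return output
-- ===== SOURCE B (Python) =====
-- from typing import List
--
-- TEMPLATE = [
--     "Filetype: Flipper SubGhz RAW File",
--     "Version: 1",
--     "Frequency: 433920000",
--     "Preset: FuriHalSubGhzPresetOok650Async",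
--     "Protocol: RAW",
-- ]
--
-- MAX_TIMINGS_VALUE = 2_000_000_000
--
-- CHUNK_SIZE = 512
--
-- def generate_sleep(duration: int) -> List[str]:
--     # Closed form: each full cycle of the accumulation covers 1000 + MAX ns.
--     values = []
--     if duration > 0:
--         full, rem = divmod(duration, MAX_TIMINGS_VALUE + 1000)
--         values = [1000, -MAX_TIMINGS_VALUE] * full
--         if rem > 0:
--             values = values + [1000, -(rem - 1000)]
--     output = TEMPLATE[:]
--     for i in range(0, len(values), CHUNK_SIZE):
--         output.append('RAW_Data: ' + ' '.join(str(z) for z in values[i:i + CHUNK_SIZE]))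
--     return output
-- ===== Notes on version B (the rewrite author's own statement) =====
-- stated objective: simpler
-- what changed: Replaces the iterative while-loop accumulation of timing pairs with a closed-form divmod: full-size [1000, -2e9] pairs replicated, plus one remainder pair when the remainder is nonzero.
import Mathlib
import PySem

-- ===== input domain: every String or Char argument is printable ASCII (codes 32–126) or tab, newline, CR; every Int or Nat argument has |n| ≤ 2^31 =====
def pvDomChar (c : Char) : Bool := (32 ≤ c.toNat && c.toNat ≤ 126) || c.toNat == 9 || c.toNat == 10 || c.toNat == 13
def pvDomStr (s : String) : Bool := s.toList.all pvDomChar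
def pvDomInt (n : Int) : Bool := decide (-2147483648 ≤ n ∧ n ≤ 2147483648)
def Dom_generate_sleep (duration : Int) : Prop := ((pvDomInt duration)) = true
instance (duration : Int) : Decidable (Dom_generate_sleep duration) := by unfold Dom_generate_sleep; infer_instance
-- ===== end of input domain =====

-- B replaces A's iterative while-loop accumulation of timing pairs with a closed-form
-- divmod computation of the values list (simpler); the chunking into RAW_Data rows is shared.


def TEMPLATE : List String :=
  ["Filetype: Flipper SubGhz RAW File",
   "Version: 1",
   "Frequency: 433920000",
   "Preset: FuriHalSubGhzPresetOok650Async",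
   "Protocol: RAW"]

def MAX_TIMINGS_VALUE : Int := 2000000000

def CHUNK_SIZE : Int := 512

-- 'for i in range(0, len(values), CHUNK_SIZE): output.append(f'RAW_Data: {" ".join(...)}')'
-- (identical code in both Pythons, shared here)
def appendChunks (output : List String) (values : List Int) : List String :=
  (PySem.List.pyRange 0 (values.length : Int) CHUNK_SIZE).foldl
    (fun out i =>
      out ++ ["RAW_Data: " ++ PySem.Str.join " "
        ((PySem.List.slice values (some i) (some (i + CHUNK_SIZE))).map PySem.Int.toStr)])
    output

-- ===== PORT A =====
-- the while loop, step for step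
def sleepLoopA (duration current_duration : Int) (values : List Int) : List Int :=
  if current_duration < duration then
    let cd1 := current_duration + 1000
    let remaining := min MAX_TIMINGS_VALUE (duration - cd1)
    sleepLoopA duration (cd1 + remaining) (values ++ [1000, -remaining])
  else values
termination_by (duration - current_duration).toNat
decreasing_by
  simp only [MAX_TIMINGS_VALUE] at *
  omega

def generate_sleep (duration : Int) : List String :=
  appendChunks TEMPLATE (sleepLoopA duration 0 [])

-- ===== PORT B =====
def valuesB (duration : Int) : List Int :=
  if duration > 0 then
    let full := PySem.Int.floordiv duration (MAX_TIMINGS_VALUE + 1000)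
    let rem := PySem.Int.mod duration (MAX_TIMINGS_VALUE + 1000)
    let base := (List.replicate full.toNat ([1000, -MAX_TIMINGS_VALUE] : List Int)).flatten
    if rem > 0 then base ++ [1000, -(rem - 1000)] else base
  else []

def generate_sleep_alt (duration : Int) : List String :=
  appendChunks TEMPLATE (valuesB duration)

-- ===== PRECONDITION & SPEC =====
def Spec_generate_sleep (duration : Int) (out : List String) : Prop := out = generate_sleep_alt duration
instance (duration : Int) (out : List String) : Decidable (Spec_generate_sleep duration out) := by unfold Spec_generate_sleep; infer_instance

-- ===== CLAIM (what is proved, stated in full; the proofs are below) =====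
def Claim_equal_generate_sleep : Prop := ∀ (duration : Int), Dom_generate_sleep duration → Spec_generate_sleep duration (generate_sleep duration)

-- ===== LEMMAS AND PROOFS =====
lemma valuesA_eq_valuesB (d : Int) (hd : d ≤ 2147483648) :
    sleepLoopA d 0 [] = valuesB d := by
  rcases lt_or_ge 0 d with h0 | h0
  · rcases lt_or_ge d 2000001000 with h1 | h1
    · -- one iteration, remainder pair only
      have hmin : min MAX_TIMINGS_VALUE (d - (0 + 1000)) = d - 1000 := by
        simp only [MAX_TIMINGS_VALUE]; omega
      rw [sleepLoopA]
      simp only [hmin]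
      have hcd : (0:Int) + 1000 + (d - 1000) = d := by ring
      rw [hcd, sleepLoopA, if_neg (lt_irrefl d)]
      have hf : PySem.Int.floordiv d (MAX_TIMINGS_VALUE + 1000) = 0 := by
        rw [PySem.Int.floordiv_eq_ediv_of_pos (by norm_num [MAX_TIMINGS_VALUE])]
        simp only [MAX_TIMINGS_VALUE]; omega
      have hm : PySem.Int.mod d (MAX_TIMINGS_VALUE + 1000) = d := by
        rw [PySem.Int.mod_eq_emod_of_pos (by norm_num [MAX_TIMINGS_VALUE])]
        simp only [MAX_TIMINGS_VALUE]; omega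
      simp [valuesB, hf, hm]
    · rcases eq_or_lt_of_le h1 with he | h2
      · -- d = 2000001000: exact multiple, no remainder pair
        rw [← he] at *
        have hmin : min MAX_TIMINGS_VALUE ((2000001000:Int) - (0 + 1000)) = MAX_TIMINGS_VALUE := by
          simp only [MAX_TIMINGS_VALUE]; omega
        rw [sleepLoopA]
        simp only [hmin]
        have hcd : (0:Int) + 1000 + MAX_TIMINGS_VALUE = 2000001000 := by
          simp only [MAX_TIMINGS_VALUE]; ring
        rw [hcd, sleepLoopA, if_neg (lt_irrefl (2000001000:Int))]
        have hf : PySem.Int.floordiv 2000001000 (MAX_TIMINGS_VALUE + 1000) = 1 := by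
          rw [PySem.Int.floordiv_eq_ediv_of_pos (by norm_num [MAX_TIMINGS_VALUE])]
          simp only [MAX_TIMINGS_VALUE]; omega
        have hm : PySem.Int.mod 2000001000 (MAX_TIMINGS_VALUE + 1000) = 0 := by
          rw [PySem.Int.mod_eq_emod_of_pos (by norm_num [MAX_TIMINGS_VALUE])]
          simp only [MAX_TIMINGS_VALUE]; omega
        simp [valuesB, hf, hm]
      · -- two iterations: one full pair, then the remainder pair
        have hmin1 : min MAX_TIMINGS_VALUE (d - (0 + 1000)) = MAX_TIMINGS_VALUE := by
          simp only [MAX_TIMINGS_VALUE]; omega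
        rw [sleepLoopA]
        simp only [if_pos h0, hmin1]
        have hcd1 : (0:Int) + 1000 + MAX_TIMINGS_VALUE = 2000001000 := by
          simp only [MAX_TIMINGS_VALUE]; ring
        rw [hcd1, sleepLoopA, if_pos h2]
        have hmin2 : min MAX_TIMINGS_VALUE (d - (2000001000 + 1000)) = d - 2000002000 := by
          simp only [MAX_TIMINGS_VALUE]; omega
        simp only [hmin2]
        have hcd2 : (2000001000:Int) + 1000 + (d - 2000002000) = d := by ring
        rw [hcd2, sleepLoopA, if_neg (lt_irrefl d)]
        have hf : PySem.Int.floordiv d (MAX_TIMINGS_VALUE + 1000) = 1 := by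
          rw [PySem.Int.floordiv_eq_ediv_of_pos (by norm_num [MAX_TIMINGS_VALUE])]
          simp only [MAX_TIMINGS_VALUE]; omega
        have hm : PySem.Int.mod d (MAX_TIMINGS_VALUE + 1000) = d - 2000001000 := by
          rw [PySem.Int.mod_eq_emod_of_pos (by norm_num [MAX_TIMINGS_VALUE])]
          simp only [MAX_TIMINGS_VALUE]; omega
        simp only [valuesB, if_pos h0, hf, hm]
        simp [MAX_TIMINGS_VALUE, h2]
        omega
  · -- duration <= 0: no pairs at all
    rw [sleepLoopA, if_neg (by omega)]
    rw [valuesB, if_neg (by omega)]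

-- ===== VERDICT (by name: the statement is the Claim_ definition above) =====
theorem generate_sleep_spec : Claim_equal_generate_sleep := by
  intro d hdom
  unfold Spec_generate_sleep generate_sleep generate_sleep_alt
  rw [valuesA_eq_valuesB]
  simp [Dom_generate_sleep, pvDomInt] at hdom
  omega
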